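-- pv_equiv track=rewrite | github.com/wKayaa/xSeKaya | extractor.py | _extract_api_keys_from_env
-- ===== SOURCE A (Python) =====
-- from typing import Dict, List, Optional, Tuple, Any
--
-- def _extract_api_keys_from_env(env_vars: Dict[str, str]) -> Dict[str, Dict[str, str]]:
--     """Extract API keys from environment variables"""
--     api_services = {}
--
--     # SendGrid
--     if 'SENDGRID_API_KEY' in env_vars:
--         api_services['sendgrid'] = {'api_key': env_vars['SENDGRID_API_KEY']}
--
--     # Mailgun
--     mailgun_keys = {}
--     for key in ['MAILGUN_DOMAIN', 'MAILGUN_SECRET', 'MAILGUN_PUBLIC_KEY']: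
--         if key in env_vars:
--             mailgun_keys[key.lower().replace('mailgun_', '')] = env_vars[key]
--     if mailgun_keys:
--         api_services['mailgun'] = mailgun_keys
--
--     # Twilio
--     twilio_keys = {}
--     for key in ['TWILIO_SID', 'TWILIO_TOKEN', 'TWILIO_PHONE']:
--         if key in env_vars:
--             twilio_keys[key.lower().replace('twilio_', '')] = env_vars[key]
--     if twilio_keys:
--         api_services['twilio'] = twilio_keys
--
--     # Stripe
--     stripe_keys = {}
--     for key in ['STRIPE_KEY', 'STRIPE_SECRET']:
--         if key in env_vars:
--             stripe_keys[key.lower().replace('stripe_', '')] = env_vars[key]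
--     if stripe_keys:
--         api_services['stripe'] = stripe_keys
--
--     return api_services
-- ===== SOURCE B (Python) =====
-- # Inverted single-pass algorithm: instead of scanning fixed key lists per service,
-- # walk the environment ONCE with a reverse index env-var -> (service, position, label),
-- # bucket the hits per service, then emit services in fixed order, each bucket sorted
-- # by its spec position.  (objective: alternative)
--
-- _FIELD_OF = {
--     'SENDGRID_API_KEY':   ('sendgrid', 0, 'api_key'),
--     'MAILGUN_DOMAIN':     ('mailgun', 0, 'domain'),
--     'MAILGUN_SECRET':     ('mailgun', 1, 'secret'),
--     'MAILGUN_PUBLIC_KEY': ('mailgun', 2, 'public_key'),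
--     'TWILIO_SID':         ('twilio', 0, 'sid'),
--     'TWILIO_TOKEN':       ('twilio', 1, 'token'),
--     'TWILIO_PHONE':       ('twilio', 2, 'phone'),
--     'STRIPE_KEY':         ('stripe', 0, 'key'),
--     'STRIPE_SECRET':      ('stripe', 1, 'secret'),
-- }
-- _SERVICES = ['sendgrid', 'mailgun', 'twilio', 'stripe']
--
--
-- def _extract_api_keys_from_env(env_vars):
--     buckets = {}
--     for name, value in env_vars.items():
--         hit = _FIELD_OF.get(name)
--         if hit is not None:
--             service, pos, label = hit
--             buckets.setdefault(service, []).append((pos, label, value))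
--     result = {}
--     for service in _SERVICES:
--         if service in buckets:
--             result[service] = {label: value
--                                for _, label, value in sorted(buckets[service],
--                                                              key=lambda t: t[0])}
--     return result
-- ===== Notes on version B (the rewrite author's own statement) =====
-- stated objective: alternative
-- what changed: Inverts the traversal: instead of four per-service scans over fixed key lists with membership tests, B makes one pass over the environment using a reverse index env-var -> (service, position, label), accumulates per-service buckets, and finally emits the services in fixed order with each bucket sorted by spec position.
import Mathlib
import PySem

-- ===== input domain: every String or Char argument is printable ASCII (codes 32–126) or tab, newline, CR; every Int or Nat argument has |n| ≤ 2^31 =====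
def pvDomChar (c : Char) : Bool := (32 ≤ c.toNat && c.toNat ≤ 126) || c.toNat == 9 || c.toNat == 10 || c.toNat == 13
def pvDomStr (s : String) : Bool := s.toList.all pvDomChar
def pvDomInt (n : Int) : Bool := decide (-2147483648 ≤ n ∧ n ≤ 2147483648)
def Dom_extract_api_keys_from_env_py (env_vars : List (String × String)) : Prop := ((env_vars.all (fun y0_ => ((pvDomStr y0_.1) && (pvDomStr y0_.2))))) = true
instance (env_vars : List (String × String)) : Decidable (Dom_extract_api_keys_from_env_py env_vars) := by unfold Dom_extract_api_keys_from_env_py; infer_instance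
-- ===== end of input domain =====

-- B inverts A's traversal: one pass over the environment with a reverse index
-- env-var -> (service, position, label), per-service buckets, then ordered emission
-- (objective: alternative); return values are proved identical.

-- ===== PORT A =====
-- All dict keys A inserts (service names, per-service labels) are distinct fresh
-- literals, so each Python dict insertion is exactly an append; the dicts are kept
-- as insertion-ordered association lists.
def extract_api_keys_from_env_py (env_vars : List (String × String)) : List (String × List (String × String)) :=
  let d := PySem.Dict.ofList env_vars
  let api : List (String × List (String × String)) := []
  -- SendGrid
  let api := if d.contains "SENDGRID_API_KEY" then
      api ++ [("sendgrid", [("api_key", (d.get? "SENDGRID_API_KEY").getD "")])]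
    else api
  -- Mailgun
  let mailgun_keys := ["MAILGUN_DOMAIN", "MAILGUN_SECRET", "MAILGUN_PUBLIC_KEY"].foldl
    (fun acc k => if d.contains k then
        acc ++ [(PySem.Str.replace (PySem.Str.lower k) "mailgun_" "", (d.get? k).getD "")]
      else acc) []
  let api := if mailgun_keys.isEmpty then api else api ++ [("mailgun", mailgun_keys)]
  -- Twilio
  let twilio_keys := ["TWILIO_SID", "TWILIO_TOKEN", "TWILIO_PHONE"].foldl
    (fun acc k => if d.contains k then
        acc ++ [(PySem.Str.replace (PySem.Str.lower k) "twilio_" "", (d.get? k).getD "")]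
      else acc) []
  let api := if twilio_keys.isEmpty then api else api ++ [("twilio", twilio_keys)]
  -- Stripe
  let stripe_keys := ["STRIPE_KEY", "STRIPE_SECRET"].foldl
    (fun acc k => if d.contains k then
        acc ++ [(PySem.Str.replace (PySem.Str.lower k) "stripe_" "", (d.get? k).getD "")]
      else acc) []
  let api := if stripe_keys.isEmpty then api else api ++ [("stripe", stripe_keys)]
  api

-- ===== PORT B =====
-- _FIELD_OF.get(name) on the literal reverse-index dict (9 distinct literal keys)
-- is exactly this first-match chain.
def pvFieldOf (name : String) : Option (String × Nat × String) :=
  if name == "SENDGRID_API_KEY" then some ("sendgrid", 0, "api_key")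
  else if name == "MAILGUN_DOMAIN" then some ("mailgun", 0, "domain")
  else if name == "MAILGUN_SECRET" then some ("mailgun", 1, "secret")
  else if name == "MAILGUN_PUBLIC_KEY" then some ("mailgun", 2, "public_key")
  else if name == "TWILIO_SID" then some ("twilio", 0, "sid")
  else if name == "TWILIO_TOKEN" then some ("twilio", 1, "token")
  else if name == "TWILIO_PHONE" then some ("twilio", 2, "phone")
  else if name == "STRIPE_KEY" then some ("stripe", 0, "key")
  else if name == "STRIPE_SECRET" then some ("stripe", 1, "secret")
  else none

def pvServices : List String := ["sendgrid", "mailgun", "twilio", "stripe"]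

def extract_api_keys_from_env_py_alt (env_vars : List (String × String)) : List (String × List (String × String)) :=
  let d := PySem.Dict.ofList env_vars
  -- buckets.setdefault(service, []).append((pos, label, value))  =  modify service [] (· ++ [(pos, label, value)])
  let buckets : PySem.Dict String (List (Nat × String × String)) :=
    d.items.foldl (fun b kv =>
      match pvFieldOf kv.1 with
      | none => b
      | some t => b.modify t.1 [] (· ++ [(t.2.1, t.2.2, kv.2)])) PySem.Dict.empty
  -- result[service] inserts fresh distinct keys in loop order, i.e. appends
  pvServices.foldl (fun res service =>
    if buckets.contains service then
      res ++ [(service,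
        (PySem.List.sorted (buckets.getD service []) (fun t => t.1)).map (fun t => (t.2.1, t.2.2)))]
    else res) []

-- ===== PRECONDITION & SPEC =====
def Spec_extract_api_keys_from_env_py (env_vars : List (String × String)) (out : List (String × List (String × String))) : Prop := out = extract_api_keys_from_env_py_alt env_vars
instance (env_vars : List (String × String)) (out : List (String × List (String × String))) : Decidable (Spec_extract_api_keys_from_env_py env_vars out) := by unfold Spec_extract_api_keys_from_env_py; infer_instance

-- ===== CLAIM (what is proved, stated in full; the proofs are below) =====
def Claim_equal_extract_api_keys_from_env_py : Prop := ∀ (env_vars : List (String × String)), Dom_extract_api_keys_from_env_py env_vars → Spec_extract_api_keys_from_env_py env_vars (extract_api_keys_from_env_py env_vars)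

-- ===== LEMMAS AND PROOFS =====

-- per-service spec triples (position, label, env var), shared by the proofs of both sides
def pvSgS : List (Nat × String × String) := [(0, "api_key", "SENDGRID_API_KEY")]
def pvMgS : List (Nat × String × String) :=
  [(0, "domain", "MAILGUN_DOMAIN"), (1, "secret", "MAILGUN_SECRET"), (2, "public_key", "MAILGUN_PUBLIC_KEY")]
def pvTwS : List (Nat × String × String) :=
  [(0, "sid", "TWILIO_SID"), (1, "token", "TWILIO_TOKEN"), (2, "phone", "TWILIO_PHONE")]
def pvStS : List (Nat × String × String) := [(0, "key", "STRIPE_KEY"), (1, "secret", "STRIPE_SECRET")]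

-- the canonical (spec-ordered) bucket and field dict of one service
def pvC (d : PySem.Dict String String) (spec : List (Nat × String × String)) : List (Nat × String × String) :=
  spec.filterMap (fun f => (d.get? f.2.2).map (fun v => (f.1, f.2.1, v)))
def pvFound (d : PySem.Dict String String) (spec : List (Nat × String × String)) : List (String × String) :=
  spec.filterMap (fun f => (d.get? f.2.2).map (fun v => (f.2.1, v)))
def pvSvc (d : PySem.Dict String String) (name : String) (spec : List (Nat × String × String)) :
    List (String × List (String × String)) :=
  if (pvFound d spec).isEmpty then [] else [(name, pvFound d spec)]

-- ---- A-side characterisation ----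
theorem pv_mg_fold (d : PySem.Dict String String) :
    (["MAILGUN_DOMAIN", "MAILGUN_SECRET", "MAILGUN_PUBLIC_KEY"].foldl
      (fun acc k => if (d.get? k).isSome then
          acc ++ [(PySem.Str.replace (PySem.Str.lower k) "mailgun_" "", (d.get? k).getD "")]
        else acc) [])
    = pvFound d pvMgS := by
  cases h1 : d.get? "MAILGUN_DOMAIN" <;> cases h2 : d.get? "MAILGUN_SECRET" <;>
    cases h3 : d.get? "MAILGUN_PUBLIC_KEY" <;> simp [pvFound, pvMgS, h1, h2, h3] <;> decide

theorem pv_tw_fold (d : PySem.Dict String String) :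
    (["TWILIO_SID", "TWILIO_TOKEN", "TWILIO_PHONE"].foldl
      (fun acc k => if (d.get? k).isSome then
          acc ++ [(PySem.Str.replace (PySem.Str.lower k) "twilio_" "", (d.get? k).getD "")]
        else acc) [])
    = pvFound d pvTwS := by
  cases h1 : d.get? "TWILIO_SID" <;> cases h2 : d.get? "TWILIO_TOKEN" <;>
    cases h3 : d.get? "TWILIO_PHONE" <;> simp [pvFound, pvTwS, h1, h2, h3] <;> decide

theorem pv_st_fold (d : PySem.Dict String String) :
    (["STRIPE_KEY", "STRIPE_SECRET"].foldl
      (fun acc k => if (d.get? k).isSome then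
          acc ++ [(PySem.Str.replace (PySem.Str.lower k) "stripe_" "", (d.get? k).getD "")]
        else acc) [])
    = pvFound d pvStS := by
  cases h1 : d.get? "STRIPE_KEY" <;> cases h2 : d.get? "STRIPE_SECRET" <;>
    simp [pvFound, pvStS, h1, h2] <;> decide

theorem pv_step (api : List (String × List (String × String))) (n : String)
    (l : List (String × String)) :
    (if l.isEmpty then api else api ++ [(n, l)]) = api ++ (if l.isEmpty then [] else [(n, l)]) := by
  cases l <;> simp

theorem pv_A_eq (env_vars : List (String × String)) :
    extract_api_keys_from_env_py env_vars =
      pvSvc (PySem.Dict.ofList env_vars) "sendgrid" pvSgS ++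
        (pvSvc (PySem.Dict.ofList env_vars) "mailgun" pvMgS ++
          (pvSvc (PySem.Dict.ofList env_vars) "twilio" pvTwS ++
            pvSvc (PySem.Dict.ofList env_vars) "stripe" pvStS)) := by
  simp only [extract_api_keys_from_env_py, PySem.Dict.contains_eq_isSome_get?]
  rw [pv_mg_fold, pv_tw_fold, pv_st_fold, pv_step, pv_step, pv_step]
  cases h : (PySem.Dict.ofList env_vars).get? "SENDGRID_API_KEY" <;>
    simp [pvSvc, pvFound, pvSgS, h, List.append_assoc]

-- ---- B-side characterisation ----

-- the joined list: each env item tagged with its (service, (pos, label, value)) hit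
def pvL (d : PySem.Dict String String) : List (String × (Nat × String × String)) :=
  d.items.filterMap (fun kv => (pvFieldOf kv.1).map (fun t => (t.1, (t.2.1, t.2.2, kv.2))))

theorem pv_bfold (its : List (String × String))
    (init : PySem.Dict String (List (Nat × String × String))) :
    its.foldl (fun b kv =>
      match pvFieldOf kv.1 with
      | none => b
      | some t => b.modify t.1 [] (· ++ [(t.2.1, t.2.2, kv.2)])) init
    = (its.filterMap (fun kv => (pvFieldOf kv.1).map (fun t => (t.1, (t.2.1, t.2.2, kv.2))))).foldl
        (fun b q => b.modify q.1 [] (· ++ [q.2])) init := by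
  rw [List.foldl_filterMap]
  apply PySem.List.foldl_congr_mem
  intro b kv _
  cases pvFieldOf kv.1 <;> rfl

-- replacing one 'none' hit of a filterMap by 'some x0' permutes x0 to the front
theorem pv_fm_update {α β : Type} (spec : List α) (hnd : spec.Nodup) (F F' : α → Option β)
    (f0 : α) (hmem : f0 ∈ spec) (x0 : β) (h1 : F' f0 = some x0) (h2 : F f0 = none)
    (h3 : ∀ f ∈ spec, f ≠ f0 → F' f = F f) :
    (spec.filterMap F').Perm (x0 :: spec.filterMap F) := by
  induction spec with
  | nil => cases hmem
  | cons g tl ih =>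
    rcases List.nodup_cons.mp hnd with ⟨hg, htl⟩
    rcases List.mem_cons.mp hmem with rfl | hf0
    · have hagree : ∀ f ∈ tl, F' f = F f := fun f hf =>
        h3 f (List.mem_cons_of_mem _ hf) (fun h => hg (h ▸ hf))
      rw [List.filterMap_cons, List.filterMap_cons, h1, h2, List.filterMap_congr hagree]
    · have hgne : g ≠ f0 := fun h => hg (h ▸ hf0)
      have hg' : F' g = F g := h3 g List.mem_cons_self hgne
      have ihp := ih htl hf0 (fun f hf hne => h3 f (List.mem_cons_of_mem _ hf) hne)
      rw [List.filterMap_cons, List.filterMap_cons, hg']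
      cases hFg : F g with
      | none => exact ihp
      | some y => exact (ihp.cons y).trans (List.Perm.swap x0 y _)

-- the join permutation: scanning the env with the reverse index collects, up to order,
-- exactly the spec-ordered lookups — provided env keys and spec vars are without duplicates
theorem pv_join_perm (spec : List (Nat × String × String))
    (hv : (spec.map (fun f => f.2.2)).Nodup)
    (its : List (String × String)) (hk : (its.map Prod.fst).Nodup) :
    (its.filterMap (fun kv => (spec.find? (fun f => f.2.2 == kv.1)).map
        (fun f => (f.1, f.2.1, kv.2)))).Perm
      (spec.filterMap (fun f => (its.find? (fun kv => kv.1 == f.2.2)).map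
        (fun kv => (f.1, f.2.1, kv.2)))) := by
  induction its with
  | nil => simp
  | cons kv tl ih =>
    rcases List.nodup_cons.mp hk with ⟨hkv, htl⟩
    rw [List.filterMap_cons]
    cases hf : spec.find? (fun f => f.2.2 == kv.1) with
    | none =>
      have hnone := List.find?_eq_none.mp hf
      have : ∀ f ∈ spec,
          ((kv :: tl).find? (fun p => p.1 == f.2.2)).map (fun p => (f.1, f.2.1, p.2))
          = (tl.find? (fun p => p.1 == f.2.2)).map (fun p => (f.1, f.2.1, p.2)) := by
        intro f hfmem
        have hne := hnone f hfmem
        rw [List.find?_cons_of_neg (by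
          simp only [beq_iff_eq] at hne ⊢
          exact fun h => hne h.symm)]
      rw [List.filterMap_congr this]
      exact ih htl
    | some f0 =>
      have hf0mem := List.mem_of_find?_eq_some hf
      have hf0eq : f0.2.2 = kv.1 := by
        have := List.find?_some hf; simpa using this
      have hup := pv_fm_update spec (hv.of_map) 
        (fun f => (tl.find? (fun p => p.1 == f.2.2)).map (fun p => (f.1, f.2.1, p.2)))
        (fun f => ((kv :: tl).find? (fun p => p.1 == f.2.2)).map (fun p => (f.1, f.2.1, p.2)))
        f0 hf0mem (f0.1, f0.2.1, kv.2)
        (by simp only []; rw [List.find?_cons_of_pos (by simp [hf0eq])]; rfl)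
        (by
          have hn : tl.find? (fun p => p.1 == f0.2.2) = none := by
            rw [List.find?_eq_none]
            intro p hp
            simp only [beq_iff_eq, hf0eq]
            exact fun h => hkv (h ▸ List.mem_map_of_mem hp)
          simp only []; rw [hn]; rfl)
        (by
          intro f hfm hne
          have hvne : f.2.2 ≠ kv.1 := by
            rw [← hf0eq]
            exact fun h => hne (List.inj_on_of_nodup_map hv hfm hf0mem h)
          simp only []
          rw [List.find?_cons_of_neg (by
            simp only [beq_iff_eq]
            exact fun h => hvne h.symm)])
      exact ((ih htl).cons _).trans hup.symm

-- positions in each canonical bucket are strictly increasing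
theorem pv_C_pairwise_mg (d : PySem.Dict String String) :
    (pvC d pvMgS).Pairwise (fun a b => a.1 < b.1) := by
  cases h1 : d.get? "MAILGUN_DOMAIN" <;> cases h2 : d.get? "MAILGUN_SECRET" <;>
    cases h3 : d.get? "MAILGUN_PUBLIC_KEY" <;> simp [pvC, pvMgS, h1, h2, h3]

theorem pv_C_pairwise_tw (d : PySem.Dict String String) :
    (pvC d pvTwS).Pairwise (fun a b => a.1 < b.1) := by
  cases h1 : d.get? "TWILIO_SID" <;> cases h2 : d.get? "TWILIO_TOKEN" <;>
    cases h3 : d.get? "TWILIO_PHONE" <;> simp [pvC, pvTwS, h1, h2, h3]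

theorem pv_C_pairwise_st (d : PySem.Dict String String) :
    (pvC d pvStS).Pairwise (fun a b => a.1 < b.1) := by
  cases h1 : d.get? "STRIPE_KEY" <;> cases h2 : d.get? "STRIPE_SECRET" <;>
    simp [pvC, pvStS, h1, h2]

theorem pv_C_pairwise_sg (d : PySem.Dict String String) :
    (pvC d pvSgS).Pairwise (fun a b => a.1 < b.1) := by
  cases h1 : d.get? "SENDGRID_API_KEY" <;> simp [pvC, pvSgS, h1]

-- dropping the positions of a canonical bucket gives the service's field dict
theorem pv_C_map (d : PySem.Dict String String) (spec : List (Nat × String × String)) :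
    (pvC d spec).map (fun t => (t.2.1, t.2.2)) = pvFound d spec := by
  simp [pvC, pvFound, List.map_filterMap, Option.map_map]
  rfl

-- the bucket dict built by B's single pass
def pvBuckets (d : PySem.Dict String String) : PySem.Dict String (List (Nat × String × String)) :=
  (pvL d).foldl (fun b q => b.modify q.1 [] (· ++ [q.2])) PySem.Dict.empty

-- pvC written over items.find?, i.e. the right-hand side of pv_join_perm
theorem pv_C_eq (d : PySem.Dict String String) (spec : List (Nat × String × String)) :
    pvC d spec = spec.filterMap (fun f => (d.items.find? (fun p => p.1 == f.2.2)).map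
      (fun p => (f.1, f.2.1, p.2))) := by
  unfold pvC
  apply List.filterMap_congr
  intro f _
  show ((d.items.find? (fun p => p.1 == f.2.2)).map (fun p => p.2)).map _ = _
  rw [Option.map_map]
  rfl

-- one step of B's emission loop produces one pvSvc block
theorem pv_svc_emit (d : PySem.Dict String String)
    (hnd : (d.items.map Prod.fst).Nodup) (s : String) (spec : List (Nat × String × String))
    (hv : (spec.map (fun f => f.2.2)).Nodup)
    (hpw : (pvC d spec).Pairwise (fun a b => a.1 < b.1))
    (hsel : ((pvL d).filter (fun q => q.1 == s)).map (fun q => q.2)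
      = d.items.filterMap (fun kv => (spec.find? (fun f => f.2.2 == kv.1)).map
          (fun f => (f.1, f.2.1, kv.2))))
    (res : List (String × List (String × String))) :
    (if (pvBuckets d).contains s then
       res ++ [(s, (PySem.List.sorted ((pvBuckets d).getD s []) (fun t => t.1)).map
         (fun t => (t.2.1, t.2.2)))]
     else res) = res ++ pvSvc d s spec := by
  have hgetD : (pvBuckets d).getD s []
      = ((pvL d).filter (fun q => q.1 == s)).map (fun q => q.2) := by
    unfold pvBuckets
    rw [PySem.Dict.getD_foldl_modify_append]
    simp
  have hperm : (pvC d spec).Perm (((pvL d).filter (fun q => q.1 == s)).map (fun q => q.2)) := by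
    rw [hsel, pv_C_eq]
    exact (pv_join_perm spec hv d.items hnd).symm
  have hsorted : PySem.List.sorted ((pvBuckets d).getD s []) (fun t => t.1) = pvC d spec := by
    rw [hgetD]
    exact PySem.List.sorted_eq_of_perm_of_pairwise_lt _ _ _ hperm hpw
  have hkeys : (pvBuckets d).keys = PySem.Set.ofList ((pvL d).map (fun q => q.1)) := by
    unfold pvBuckets
    rw [PySem.Dict.keys_foldl_modify_key (pvL d) (fun q => q.1) [] (fun b q cur => cur ++ [q.2])
      PySem.Dict.empty, PySem.Dict.keys_empty]
    rfl
  have hmem : s ∈ (pvL d).map (fun q => q.1)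
      ↔ ¬ (((pvL d).filter (fun q => q.1 == s)).map (fun q => q.2) = []) := by
    rw [List.map_eq_nil_iff, List.filter_eq_nil_iff]
    simp only [List.mem_map, beq_iff_eq, not_forall, not_not, exists_prop]
  have hcont : (pvBuckets d).contains s = true ↔ ¬ (pvC d spec = []) := by
    rw [PySem.Dict.contains_iff_mem_keys, hkeys, PySem.Set.mem_ofList, hmem]
    constructor
    · exact fun h hC => h ((hC ▸ hperm).symm.eq_nil)
    · exact fun h hB => h ((hB ▸ hperm).eq_nil)
  have hfound : pvFound d spec = (pvC d spec).map (fun t => (t.2.1, t.2.2)) :=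
    (pv_C_map d spec).symm
  cases hc : (pvBuckets d).contains s
  · have hCnil : pvC d spec = [] := by
      by_contra h
      exact absurd (hcont.mpr h) (by simp [hc])
    simp [pvSvc, hfound, hCnil]
  · have hCne : ¬ (pvC d spec = []) := hcont.mp hc
    have : (pvFound d spec).isEmpty = false := by
      rw [hfound]
      simpa [List.isEmpty_iff, List.map_eq_nil_iff] using hCne
    simp only [pvSvc, this, Bool.false_eq_true, if_false]
    rw [hsorted, pv_C_map, hfound]
    simp

-- the four per-service selections of the reverse index agree with spec-list lookup
theorem pv_sel_sg (d : PySem.Dict String String) :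
    ((pvL d).filter (fun q => q.1 == "sendgrid")).map (fun q => q.2)
      = d.items.filterMap (fun kv => (pvSgS.find? (fun f => f.2.2 == kv.1)).map
          (fun f => (f.1, f.2.1, kv.2))) := by
  unfold pvL
  rw [List.filter_filterMap, List.map_filterMap]
  apply List.filterMap_congr
  intro kv _
  simp only [pvFieldOf, pvSgS]
  split_ifs with h1 h2 h3 h4 h5 h6 h7 h8 h9 <;> simp_all [List.find?]
  simp [beq_eq_false_iff_ne.2 (Ne.symm h1)]

theorem pv_sel_mg (d : PySem.Dict String String) :
    ((pvL d).filter (fun q => q.1 == "mailgun")).map (fun q => q.2)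
      = d.items.filterMap (fun kv => (pvMgS.find? (fun f => f.2.2 == kv.1)).map
          (fun f => (f.1, f.2.1, kv.2))) := by
  unfold pvL
  rw [List.filter_filterMap, List.map_filterMap]
  apply List.filterMap_congr
  intro kv _
  simp only [pvFieldOf, pvMgS]
  split_ifs with h1 h2 h3 h4 h5 h6 h7 h8 h9 <;> simp_all [List.find?]
  simp [beq_eq_false_iff_ne.2 (Ne.symm h2), beq_eq_false_iff_ne.2 (Ne.symm h3),
      beq_eq_false_iff_ne.2 (Ne.symm h4)]

theorem pv_sel_tw (d : PySem.Dict String String) :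
    ((pvL d).filter (fun q => q.1 == "twilio")).map (fun q => q.2)
      = d.items.filterMap (fun kv => (pvTwS.find? (fun f => f.2.2 == kv.1)).map
          (fun f => (f.1, f.2.1, kv.2))) := by
  unfold pvL
  rw [List.filter_filterMap, List.map_filterMap]
  apply List.filterMap_congr
  intro kv _
  simp only [pvFieldOf, pvTwS]
  split_ifs with h1 h2 h3 h4 h5 h6 h7 h8 h9 <;> simp_all [List.find?]
  simp [beq_eq_false_iff_ne.2 (Ne.symm h5), beq_eq_false_iff_ne.2 (Ne.symm h6),
      beq_eq_false_iff_ne.2 (Ne.symm h7)]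

theorem pv_sel_st (d : PySem.Dict String String) :
    ((pvL d).filter (fun q => q.1 == "stripe")).map (fun q => q.2)
      = d.items.filterMap (fun kv => (pvStS.find? (fun f => f.2.2 == kv.1)).map
          (fun f => (f.1, f.2.1, kv.2))) := by
  unfold pvL
  rw [List.filter_filterMap, List.map_filterMap]
  apply List.filterMap_congr
  intro kv _
  simp only [pvFieldOf, pvStS]
  split_ifs with h1 h2 h3 h4 h5 h6 h7 h8 h9 <;> simp_all [List.find?]
  simp [beq_eq_false_iff_ne.2 (Ne.symm h8), beq_eq_false_iff_ne.2 (Ne.symm h9)]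

theorem pv_B_eq (env_vars : List (String × String)) :
    extract_api_keys_from_env_py_alt env_vars =
      pvSvc (PySem.Dict.ofList env_vars) "sendgrid" pvSgS ++
        (pvSvc (PySem.Dict.ofList env_vars) "mailgun" pvMgS ++
          (pvSvc (PySem.Dict.ofList env_vars) "twilio" pvTwS ++
            pvSvc (PySem.Dict.ofList env_vars) "stripe" pvStS)) := by
  have hnd : ((PySem.Dict.ofList env_vars).items.map Prod.fst).Nodup := by
    simpa [PySem.Dict.keys] using PySem.Dict.nodup_keys_ofList env_vars
  simp only [extract_api_keys_from_env_py_alt]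
  rw [show ((PySem.Dict.ofList env_vars).items.foldl (fun b kv =>
      match pvFieldOf kv.1 with
      | none => b
      | some t => b.modify t.1 [] (· ++ [(t.2.1, t.2.2, kv.2)])) PySem.Dict.empty)
    = pvBuckets (PySem.Dict.ofList env_vars) from (pv_bfold _ _).trans rfl]
  simp only [pvServices, List.foldl]
  rw [pv_svc_emit _ hnd _ pvSgS (by decide) (pv_C_pairwise_sg _) (pv_sel_sg _),
    pv_svc_emit _ hnd _ pvMgS (by decide) (pv_C_pairwise_mg _) (pv_sel_mg _),
    pv_svc_emit _ hnd _ pvTwS (by decide) (pv_C_pairwise_tw _) (pv_sel_tw _),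
    pv_svc_emit _ hnd _ pvStS (by decide) (pv_C_pairwise_st _) (pv_sel_st _)]
  simp [List.append_assoc]

-- ===== VERDICT (by name: the statement is the Claim_ definition above) =====
theorem extract_api_keys_from_env_py_spec : Claim_equal_extract_api_keys_from_env_py := by
  intro env_vars _
  unfold Spec_extract_api_keys_from_env_py
  rw [pv_A_eq, pv_B_eq]
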